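-- pv_equiv track=rewrite | github.com/mehta-lab/waveorder | waveorder/io/streaming.py | make_tile_batches
-- ===== SOURCE A (Python) =====
-- def make_tile_batches(
--     fov_y: int, fov_x: int, tile_size: int, batch_size: int,
-- ) -> list[list[tuple[int, int, int, int]]]:
--     """Split a FOV into non-overlapping tile batches.
--
--     Returns a list of batches, where each batch is a list of
--     ``(y0, y1, x0, x1)`` bounds. Edge tiles that don't match
--     ``tile_size`` exactly are dropped.
--     """
--     all_bounds = []
--     for y in range(0, fov_y, tile_size):
--         for x in range(0, fov_x, tile_size):
--             y_end = y + tile_size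
--             x_end = x + tile_size
--             if y_end <= fov_y and x_end <= fov_x:
--                 all_bounds.append((y, y_end, x, x_end))
--     return [all_bounds[i : i + batch_size] for i in range(0, len(all_bounds), batch_size)]
-- ===== SOURCE B (Python) =====
-- def make_tile_batches(
--     fov_y: int, fov_x: int, tile_size: int, batch_size: int,
-- ) -> list[list[tuple[int, int, int, int]]]:
--     """Split a FOV into non-overlapping tile batches.
--
--     Index-arithmetic construction: the valid tile starts per axis are
--     computed once; the k-th batch is produced directly from the flat tile
--     indices j in [k*batch_size, min((k+1)*batch_size, total)) via
--     j // nx and j % nx, without materialising the flat tile list or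
--     slicing it afterwards.
--     """
--     ys = [y for y in range(0, fov_y, tile_size) if y + tile_size <= fov_y]
--     xs = [x for x in range(0, fov_x, tile_size) if x + tile_size <= fov_x]
--     nx = len(xs)
--     total = len(ys) * nx
--     n_batches = -(-total // batch_size)  # ceil for positive batch_size, <= 0 otherwise
--     return [
--         [
--             (ys[j // nx], ys[j // nx] + tile_size, xs[j % nx], xs[j % nx] + tile_size)
--             for j in range(k * batch_size, min((k + 1) * batch_size, total))
--         ]
--         for k in range(n_batches)
--     ]
-- ===== Notes on version B (the rewrite author's own statement) =====
-- stated objective: alternative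
-- what changed: Replaces A's guarded double loop over tile coordinates plus a slice-chunking pass by an index-arithmetic construction: per-axis valid-start tables are built once and each batch is generated directly from its flat tile-index interval via j//nx and j%nx, never materialising the flat tile list.
import Mathlib
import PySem

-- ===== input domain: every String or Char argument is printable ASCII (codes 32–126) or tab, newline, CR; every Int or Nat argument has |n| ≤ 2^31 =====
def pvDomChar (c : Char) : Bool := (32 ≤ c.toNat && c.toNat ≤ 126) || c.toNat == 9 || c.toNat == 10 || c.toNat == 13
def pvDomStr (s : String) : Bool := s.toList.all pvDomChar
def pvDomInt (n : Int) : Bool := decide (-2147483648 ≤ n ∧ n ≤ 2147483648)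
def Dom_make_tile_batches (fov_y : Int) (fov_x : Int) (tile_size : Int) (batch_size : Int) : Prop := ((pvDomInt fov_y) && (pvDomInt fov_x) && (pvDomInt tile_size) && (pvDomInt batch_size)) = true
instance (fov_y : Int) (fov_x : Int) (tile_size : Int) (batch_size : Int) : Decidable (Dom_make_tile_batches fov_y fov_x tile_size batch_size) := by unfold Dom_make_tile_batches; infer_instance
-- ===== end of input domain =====

-- B builds per-axis valid-start tables once and generates each batch directly from its
-- flat tile-index interval via j//nx and j%nx (no flat tile list, no slicing pass);
-- objective: alternative decomposition of the same cost.

-- ===== PORT A =====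
def make_tile_batches (fov_y : Int) (fov_x : Int) (tile_size : Int) (batch_size : Int) : List (List (Int × Int × Int × Int)) :=
  let all_bounds : List (Int × Int × Int × Int) :=
    (PySem.List.pyRange 0 fov_y tile_size).foldl (fun acc y =>
      (PySem.List.pyRange 0 fov_x tile_size).foldl (fun acc2 x =>
        let y_end := y + tile_size
        let x_end := x + tile_size
        if y_end ≤ fov_y ∧ x_end ≤ fov_x then acc2 ++ [(y, y_end, x, x_end)] else acc2) acc) []
  (PySem.List.pyRange 0 (all_bounds.length : Int) batch_size).map
    (fun i => PySem.List.slice all_bounds (some i) (some (i + batch_size)))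

-- ===== PORT B =====
def make_tile_batches_alt (fov_y : Int) (fov_x : Int) (tile_size : Int) (batch_size : Int) : List (List (Int × Int × Int × Int)) :=
  let ys := (PySem.List.pyRange 0 fov_y tile_size).filter (fun y => decide (y + tile_size ≤ fov_y))
  let xs := (PySem.List.pyRange 0 fov_x tile_size).filter (fun x => decide (x + tile_size ≤ fov_x))
  let nx : Int := xs.length
  let total : Int := (ys.length : Int) * nx
  let n_batches : Int := -(PySem.Int.floordiv (-total) batch_size)
  (PySem.List.pyRange 0 n_batches 1).map (fun k =>
    (PySem.List.pyRange (k * batch_size) (min ((k + 1) * batch_size) total) 1).map (fun j =>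
      -- ys[j // nx] and xs[j % nx]: the index is always in range for j in the interval,
      -- so Python's [] never raises; ported with pyGetD (default never read)
      let y := PySem.List.pyGetD ys (PySem.Int.floordiv j nx) 0
      let x := PySem.List.pyGetD xs (PySem.Int.mod j nx) 0
      (y, y + tile_size, x, x + tile_size)))

-- ===== PRECONDITION & SPEC =====
-- tile_size = 0 or batch_size = 0: A raises ValueError (zero range step); B raises too
-- (ValueError resp. ZeroDivisionError).
def Pre_make_tile_batches (fov_y : Int) (fov_x : Int) (tile_size : Int) (batch_size : Int) : Prop :=
  tile_size ≠ 0 ∧ batch_size ≠ 0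
instance (fov_y : Int) (fov_x : Int) (tile_size : Int) (batch_size : Int) : Decidable (Pre_make_tile_batches fov_y fov_x tile_size batch_size) := by unfold Pre_make_tile_batches; infer_instance
def pvWitness_make_tile_batches : Int × Int × Int × Int := (5, 7, 2, 3)

def Spec_make_tile_batches (fov_y : Int) (fov_x : Int) (tile_size : Int) (batch_size : Int) (out : List (List (Int × Int × Int × Int))) : Prop := out = make_tile_batches_alt fov_y fov_x tile_size batch_size
instance (fov_y : Int) (fov_x : Int) (tile_size : Int) (batch_size : Int) (out : List (List (Int × Int × Int × Int))) : Decidable (Spec_make_tile_batches fov_y fov_x tile_size batch_size out) := by unfold Spec_make_tile_batches; infer_instance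

-- ===== CLAIM (what is proved, stated in full; the proofs are below) =====
def Claim_equal_make_tile_batches : Prop := ∀ (fov_y : Int) (fov_x : Int) (tile_size : Int) (batch_size : Int), Dom_make_tile_batches fov_y fov_x tile_size batch_size → Pre_make_tile_batches fov_y fov_x tile_size batch_size → Spec_make_tile_batches fov_y fov_x tile_size batch_size (make_tile_batches fov_y fov_x tile_size batch_size)

-- ===== LEMMAS AND PROOFS =====

-- A's guarded inner loop = conditional map over the filtered x-starts
theorem inner_fold (fov_y fov_x t y : Int) (l : List Int) (acc : List (Int × Int × Int × Int)) :
    l.foldl (fun acc2 x => if y + t ≤ fov_y ∧ x + t ≤ fov_x then acc2 ++ [(y, y + t, x, x + t)] else acc2) acc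
      = acc ++ (if y + t ≤ fov_y then
          ((l.filter (fun x => decide (x + t ≤ fov_x))).map (fun x => (y, y + t, x, x + t))) else []) := by
  induction l generalizing acc with
  | nil => simp
  | cons x l ih =>
    simp only [List.foldl_cons, List.filter_cons]
    rw [ih]
    by_cases hy : y + t ≤ fov_y <;> by_cases hx : x + t ≤ fov_x <;>
      simp [hy, hx]

-- A's guarded double loop = flatMap of the product of the filtered axis lists
theorem outer_fold (fov_y fov_x t : Int) (xs : List Int) (l : List Int) (acc : List (Int × Int × Int × Int)) :
    l.foldl (fun acc y =>
        xs.foldl (fun acc2 x => if y + t ≤ fov_y ∧ x + t ≤ fov_x then acc2 ++ [(y, y + t, x, x + t)] else acc2) acc) acc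
      = acc ++ (l.filter (fun y => decide (y + t ≤ fov_y))).flatMap
          (fun y => (xs.filter (fun x => decide (x + t ≤ fov_x))).map (fun x => (y, y + t, x, x + t))) := by
  induction l generalizing acc with
  | nil => simp
  | cons y l ih =>
    simp only [List.foldl_cons, List.filter_cons]
    rw [inner_fold, ih]
    by_cases hy : y + t ≤ fov_y <;> simp [hy]

-- indexing into a row-major product list: element k is f ys[k / nx] xs[k % nx]
theorem flatMap_prod_getD {α : Type} (ys xs : List Int) (f : Int → Int → α) (d : α) (k : Nat)
    (hk : k < ys.length * xs.length) :
    (ys.flatMap (fun y => (xs.map (f y)))).getD k d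
      = f (ys.getD (k / xs.length) 0) (xs.getD (k % xs.length) 0) := by
  induction ys generalizing k with
  | nil => simp at hk
  | cons y ys ih =>
    have hnx : 0 < xs.length := by
      rcases Nat.eq_zero_or_pos xs.length with h | h
      · simp [h] at hk
      · exact h
    by_cases hlt : k < xs.length
    · rw [List.flatMap_cons, List.getD_append _ _ _ _ (by simpa using hlt)]
      rw [List.getD_eq_getElem _ _ (by simpa using hlt), List.getElem_map]
      rw [Nat.div_eq_of_lt hlt, Nat.mod_eq_of_lt hlt]
      simp [List.getElem?_eq_getElem hlt]
    · rw [not_lt] at hlt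
      rw [List.flatMap_cons, List.getD_append_right _ _ _ _ (by simpa using hlt)]
      have hk' : k - xs.length < ys.length * xs.length := by
        have := hk; simp only [List.length_cons] at this
        have : k < ys.length * xs.length + xs.length := by
          calc k < (ys.length + 1) * xs.length := by simpa [List.length_cons] using hk
            _ = ys.length * xs.length + xs.length := by ring
        omega
      rw [List.length_map, ih _ hk']
      have hdiv : k / xs.length = (k - xs.length) / xs.length + 1 := Nat.div_eq_sub_div hnx hlt
      have hmod : k % xs.length = (k - xs.length) % xs.length := Nat.mod_eq_sub_mod hlt
      rw [hdiv, hmod, List.getD_cons_succ]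

-- one batch: Python's L[a : c] equals the index-generated [L[j] for j in range(a, min(c, len(L)))]
theorem map_getD_range_slice {α : Type} [Inhabited α] (L : List α) (d : α) (a c : Int)
    (ha : 0 ≤ a) (hc : 0 ≤ c) :
    (PySem.List.pyRange a (min c (L.length : Int)) 1).map (fun j => PySem.List.pyGetD L j d)
      = PySem.List.slice L (some a) (some c) := by
  rw [PySem.List.slice_toNat L ha hc]
  apply List.ext_getElem
  · simp only [List.length_map, PySem.List.length_pyRange_one, List.length_take, List.length_drop]
    omega
  · intro i h1 h2
    simp only [List.length_map, PySem.List.length_pyRange_one] at h1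
    simp only [List.getElem_map, PySem.List.getElem_pyRange_one]
    rw [List.getElem_take, List.getElem_drop]
    have hbound : a + (i : Int) < (L.length : Int) := by omega
    rw [PySem.List.pyGetD_eq_getElem L d (by omega) hbound]
    congr 1
    omega

-- B's tuple built from the per-axis tables at j//nx, j%nx is element j of the product list
theorem quad_eq_getD (ys xs : List Int) (t j : Int) (h0 : 0 ≤ j)
    (hj : j < (ys.length : Int) * (xs.length : Int)) :
    ((PySem.List.pyGetD ys (PySem.Int.floordiv j (xs.length : Int)) 0,
      PySem.List.pyGetD ys (PySem.Int.floordiv j (xs.length : Int)) 0 + t,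
      PySem.List.pyGetD xs (PySem.Int.mod j (xs.length : Int)) 0,
      PySem.List.pyGetD xs (PySem.Int.mod j (xs.length : Int)) 0 + t) :
        Int × Int × Int × Int)
      = PySem.List.pyGetD (ys.flatMap (fun y => xs.map (fun x => (y, y + t, x, x + t)))) j
          (0, 0, 0, 0) := by
  obtain ⟨k, rfl⟩ : ∃ k : Nat, j = (k : Int) := ⟨j.toNat, by omega⟩
  have hk : k < ys.length * xs.length := by exact_mod_cast hj
  rw [PySem.Int.floordiv_natCast, PySem.Int.mod_natCast]
  simp only [PySem.List.pyGetD_natCast]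
  rw [flatMap_prod_getD ys xs (fun y x => (y, y + t, x, x + t)) (0, 0, 0, 0) k hk]

-- Python's -(-n // b) for b > 0 is the count of range(0, n, b)
theorem ceil_count (n b : Int) (hn : 0 ≤ n) (hb : 0 < b) :
    (-(PySem.Int.floordiv (-n) b)).toNat
      = if 0 < n then ((n - 0 + b - 1) / b).toNat else 0 := by
  set m := -(PySem.Int.floordiv (-n) b) with hm
  have hchar : (m - 1) * b < n ∧ n ≤ m * b :=
    (PySem.Int.neg_floordiv_neg_eq_iff_of_pos hb).mp rfl
  by_cases hpos : 0 < n
  · rw [if_pos hpos]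
    set c := (n - 0 + b - 1) / b with hc
    have hdm : b * c + (n - 0 + b - 1) % b = n - 0 + b - 1 := Int.mul_ediv_add_emod _ b
    have hr0 : 0 ≤ (n - 0 + b - 1) % b := Int.emod_nonneg _ (by omega)
    have hrb : (n - 0 + b - 1) % b < b := Int.emod_lt_of_pos _ hb
    have hcub : n ≤ c * b ∧ (c - 1) * b < n := by constructor <;> nlinarith
    have h1 : m - 1 < c := by
      have := lt_of_lt_of_le hchar.1 hcub.1
      exact lt_of_mul_lt_mul_right this hb.le
    have h2 : c - 1 < m := by
      have := lt_of_lt_of_le hcub.2 hchar.2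
      exact lt_of_mul_lt_mul_right this hb.le
    have : m = c := by omega
    rw [this]
  · rw [if_neg hpos]
    have hn0 : n = 0 := by omega
    have h1 : m ≤ 0 := by nlinarith [hchar.1]
    have h2 : 0 ≤ m := by nlinarith [hchar.2]
    omega

-- range(0, n, b) is empty for n ≥ 0 and negative step b
theorem pyRange_nonneg_neg_step (n b : Int) (hn : 0 ≤ n) (hb : b < 0) :
    PySem.List.pyRange 0 n b = [] := by
  simp only [PySem.List.pyRange, if_neg hb.ne, if_neg (not_lt.mpr hb.le), if_neg (not_lt.mpr hn)]
  simp

-- ===== VERDICT (by name: the statement is the Claim_ definition above) =====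
theorem make_tile_batches_spec : Claim_equal_make_tile_batches := by
  intro fov_y fov_x t b _ hpre
  obtain ⟨ht, hb⟩ := hpre
  unfold Spec_make_tile_batches make_tile_batches make_tile_batches_alt
  rw [outer_fold]
  simp only [List.nil_append]
  set ys := (PySem.List.pyRange 0 fov_y t).filter (fun y => decide (y + t ≤ fov_y)) with hys
  set xs := (PySem.List.pyRange 0 fov_x t).filter (fun x => decide (x + t ≤ fov_x)) with hxs
  set L := ys.flatMap (fun y => xs.map (fun x => (y, y + t, x, x + t))) with hL
  have hlen : L.length = ys.length * xs.length := by
    simp [hL, List.length_flatMap, List.map_const', List.sum_replicate]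
  have htotal : ((ys.length : Int) * (xs.length : Int)) = (L.length : Int) := by
    push_cast [hlen]; ring
  rw [htotal]
  rcases lt_or_gt_of_ne hb with hbneg | hbpos
  · -- negative batch_size: both sides are the empty list
    rw [pyRange_nonneg_neg_step _ b (by positivity) hbneg]
    have hq : 0 ≤ PySem.Int.floordiv (-(L.length : Int)) b := by
      have h1 := PySem.Int.floordiv_mul_add_mod (-(L.length : Int)) b
      have h2 := PySem.Int.mod_neg_bounds (-(L.length : Int)) hbneg
      nlinarith [Int.natCast_nonneg L.length]
    rw [PySem.List.pyRange_one_eq_nil (by omega)]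
    simp
  · -- positive batch_size
    rw [PySem.List.pyRange_of_pos 0 (L.length : Int) hbpos,
        PySem.List.pyRange_one 0 (-(PySem.Int.floordiv (-(L.length : Int)) b)),
        ← ceil_count (L.length : Int) b (by positivity) hbpos]
    simp only [List.map_map, Int.sub_zero]
    apply List.map_congr_left
    intro k _
    simp only [Function.comp_apply, zero_add]
    rw [show ((k : Int) * b) = b * (k : Int) by ring] at *
    have hkb : (0 : Int) ≤ b * (k : Int) := by positivity
    rw [← map_getD_range_slice L (0, 0, 0, 0) (b * (k : Int)) (b * (k : Int) + b) hkb (by omega)]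
    have hmin : min (((k : Int) + 1) * b) (L.length : Int)
        = min (b * (k : Int) + b) (L.length : Int) := by ring_nf
    rw [hmin]
    apply List.map_congr_left
    intro j hj
    rw [PySem.List.mem_pyRange_one] at hj
    exact (quad_eq_getD ys xs t j (by omega) (by rw [htotal]; omega)).symm
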